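-- pv_equiv track=rewrite | github.com/ktn-andrea/Scripts | 09/prim_palindrom.py | prime_palindrome
-- ===== SOURCE A (Python) =====
-- def prime_palindrome(num: int) -> int:
--     if num <= 1:
--         return 2
--     elif num == 2:
--         return 3
--
--     n: int = num
--     is_prime: bool = True
--     while True:
--         n += 1
--         for j in range(2, n):
--             if n % j == 0:
--                 is_prime = False
--                 break
--             else:
--                 is_prime = True
--         if is_prime == True and n > num:
--             if str(n) == str(n)[::-1]:
--                 return int(n)
-- ===== SOURCE B (Python) =====
-- def _is_prime(n: int) -> bool:
--     if n < 2:
--         return False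
--     if n % 2 == 0:
--         return n == 2
--     d = 3
--     while d * d <= n:
--         if n % d == 0:
--             return False
--         d += 2
--     return True
--
--
-- def prime_palindrome(num: int) -> int:
--     n = max(num + 1, 2)
--     while True:
--         s = str(n)
--         if s == s[::-1] and _is_prime(n):
--             return n
--         n += 1
-- ===== Notes on version B (the rewrite author's own statement) =====
-- stated objective: faster
-- what changed: Replaced A's full trial division over every smaller number per candidate by a short-circuit palindrome precheck followed by odd trial division only up to the square root, and folded A's two special-cased small returns into a single clamped start value.
import Mathlib
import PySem

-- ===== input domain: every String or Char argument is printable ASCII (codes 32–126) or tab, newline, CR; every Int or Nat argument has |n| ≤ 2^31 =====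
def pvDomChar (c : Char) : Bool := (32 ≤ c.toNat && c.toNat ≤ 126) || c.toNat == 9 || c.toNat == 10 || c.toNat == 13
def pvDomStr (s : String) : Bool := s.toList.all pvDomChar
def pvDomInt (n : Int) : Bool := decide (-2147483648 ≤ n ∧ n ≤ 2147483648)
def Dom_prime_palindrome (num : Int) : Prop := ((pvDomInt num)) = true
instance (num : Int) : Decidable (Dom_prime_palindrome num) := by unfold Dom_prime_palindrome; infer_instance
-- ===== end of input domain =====

-- B replaces A's full trial division over range(2,n) per candidate by a palindrome
-- precheck plus odd trial division up to sqrt(n) (objective: faster, asymptotic per candidate).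
-- Both 'while True' loops are ported with a fuel counter large enough for every num in Dom
-- (the next prime palindrome above 2^31 is 10000500001 < 2*10^10); fuel only makes the
-- recursion total, it is never exhausted on Dom.

-- ===== PORT A =====
-- str(n) == str(n)[::-1]  (identical code occurs in A and in B; shared helper)
def pvIsPal (n : Int) : Bool :=
  let s := PySem.Int.toStr n
  match PySem.Str.slice? s none none (-1) with
  | some r => s == r
  | none => false

-- the inner 'for j in range(2, n)' with its break; acc is the incoming value of is_prime
def pvForJ (n : Int) : List Int → Bool → Bool
  | [], acc => acc
  | j :: js, _ => if PySem.Int.mod n j == 0 then false else pvForJ n js true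

-- the 'while True' loop of A; state (n, is_prime)
def pvLoopA (num : Int) : Nat → Int → Bool → Int
  | 0, _, _ => 0
  | f + 1, n, isp =>
      let n' := n + 1
      let isp' := pvForJ n' (PySem.List.pyRange 2 n' 1) isp
      if isp' && decide (n' > num) then
        if pvIsPal n' then n' else pvLoopA num f n' isp'
      else pvLoopA num f n' isp'

def prime_palindrome (num : Int) : Int :=
  if num ≤ 1 then 2
  else if num = 2 then 3
  else pvLoopA num (20000000000 - num).toNat num true

-- ===== PORT B =====
-- the 'while d*d <= n' trial-division loop of _is_prime
def pvTrial (n d : Int) : Bool :=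
  if h : d * d ≤ n then
    (if PySem.Int.mod n d == 0 then false else pvTrial n (d + 2))
  else true
termination_by (n + 3 - d).toNat
decreasing_by
  have hd : d ≤ n := by
    by_cases h0 : d ≤ 0
    · have := mul_self_nonneg d; omega
    · nlinarith
  omega

def pvIsPrimeB (n : Int) : Bool :=
  if n < 2 then false
  else if PySem.Int.mod n 2 == 0 then n == 2
  else pvTrial n 3

-- B's 'while True' loop over candidates
def pvLoopB : Nat → Int → Int
  | 0, _ => 0
  | f + 1, n => if pvIsPal n && pvIsPrimeB n then n else pvLoopB f (n + 1)

def prime_palindrome_alt (num : Int) : Int :=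
  pvLoopB (20000000001 - max (num + 1) 2).toNat (max (num + 1) 2)

-- ===== PRECONDITION & SPEC =====
def Spec_prime_palindrome (num : Int) (out : Int) : Prop := out = prime_palindrome_alt num
instance (num : Int) (out : Int) : Decidable (Spec_prime_palindrome num out) := by unfold Spec_prime_palindrome; infer_instance

-- ===== CLAIM (what is proved, stated in full; the proofs are below) =====
def Claim_equal_prime_palindrome : Prop := ∀ (num : Int), Dom_prime_palindrome num → Spec_prime_palindrome num (prime_palindrome num)

-- ===== LEMMAS AND PROOFS =====

-- 'm has no divisor j with 2 ≤ j < m' — the condition both primality tests decide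
def pvNoDiv (m : Int) : Prop := ∀ j : Int, 2 ≤ j → j < m → ¬ j ∣ m

lemma forJ_true_iff (m : Int) : ∀ (k : Nat) (a : Int), 2 ≤ a → a < m → (m - a).toNat = k →
    ∀ acc, (pvForJ m (PySem.List.pyRange a m 1) acc = true ↔ ∀ j : Int, a ≤ j → j < m → ¬ j ∣ m) := by
  intro k
  induction k using Nat.strong_induction_on with
  | _ k ih =>
    intro a ha2 ham hk acc
    rw [PySem.List.pyRange_one_cons ham]
    show (if PySem.Int.mod m a == 0 then false else pvForJ m (PySem.List.pyRange (a+1) m 1) true) = true ↔ _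
    by_cases hmod : PySem.Int.mod m a = 0
    · have hdvd : a ∣ m := (PySem.Int.mod_eq_zero_iff_dvd m a).mp hmod
      simp only [hmod, BEq.rfl, if_true, Bool.false_eq_true, false_iff]
      exact fun h => h a le_rfl ham hdvd
    · have hadvd : ¬ a ∣ m := fun hd => hmod ((PySem.Int.mod_eq_zero_iff_dvd m a).mpr hd)
      rw [if_neg (by simpa using hmod)]
      by_cases hlt : a + 1 < m
      · rw [ih (m - (a+1)).toNat (by omega) (a+1) (by omega) hlt rfl true]
        constructor
        · intro h j hj1 hj2
          rcases eq_or_lt_of_le hj1 with he | hl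
          · exact he ▸ hadvd
          · exact h j (by omega) hj2
        · exact fun h j hj1 hj2 => h j (by omega) hj2
      · have hm' : m = a + 1 := by omega
        rw [PySem.List.pyRange_one_eq_nil (by omega)]
        show pvForJ m [] true = true ↔ _
        simp only [pvForJ, true_iff]
        intro j hj1 hj2
        have : j = a := by omega
        exact this ▸ hadvd

lemma no_div_of_sqrt (m d : Int) (hm : 3 ≤ m) (hd3 : 3 ≤ d) (hdd : m < d * d)
    (hbelow : ∀ j : Int, 2 ≤ j → j < d → ¬ j ∣ m) : pvNoDiv m := by
  intro j hj2 hjm hdvd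
  by_cases hjd : j < d
  · exact hbelow j hj2 hjd hdvd
  · have hjd' : d ≤ j := by omega
    obtain ⟨c, hc⟩ := hdvd
    have hc1 : 1 ≤ c := by nlinarith
    have hcne : c ≠ 1 := by intro h; rw [h, mul_one] at hc; omega
    have hcd : c < d := by nlinarith
    exact hbelow c (by omega) hcd ⟨j, by linarith [hc]⟩

lemma trial_true_iff (m : Int) (hm : 3 ≤ m) (hodd : ¬ (2:Int) ∣ m) :
    ∀ (k : Nat) (d : Int), 3 ≤ d → ¬ (2:Int) ∣ d → (∀ j : Int, 2 ≤ j → j < d → ¬ j ∣ m) →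
    (m + 3 - d).toNat = k → (pvTrial m d = true ↔ pvNoDiv m) := by
  intro k
  induction k using Nat.strong_induction_on with
  | _ k ih =>
    intro d hd3 hdodd hbelow hk
    rw [pvTrial]
    by_cases hdd : d * d ≤ m
    · rw [dif_pos hdd]
      by_cases hmod : PySem.Int.mod m d = 0
      · have hdvd : d ∣ m := (PySem.Int.mod_eq_zero_iff_dvd m d).mp hmod
        have hdm : d < m := by nlinarith
        simp only [hmod, BEq.rfl, if_true, Bool.false_eq_true, false_iff]
        exact fun h => h d (by omega) hdm hdvd
      · have hddvd : ¬ d ∣ m := fun hd => hmod ((PySem.Int.mod_eq_zero_iff_dvd m d).mpr hd)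
        rw [if_neg (by simpa using hmod)]
        have hdlem : d ≤ m := by nlinarith
        apply ih (m + 3 - (d+2)).toNat (by omega) (d+2) (by omega) (by intro h; exact hdodd (by omega)) ?_ rfl
        intro j hj2 hjd hjm
        by_cases hja : j < d
        · exact hbelow j hj2 hja hjm
        · by_cases hje : j = d
          · exact hddvd (hje ▸ hjm)
          · have hje1 : j = d + 1 := by omega
            have h2j : (2:Int) ∣ j := by omega
            exact hodd (dvd_trans h2j hjm)
    · rw [dif_neg hdd]
      simp only [true_iff]
      exact no_div_of_sqrt m d hm hd3 (by omega) hbelow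

lemma primeB_true_iff (m : Int) (hm : 3 ≤ m) : (pvIsPrimeB m = true ↔ pvNoDiv m) := by
  unfold pvIsPrimeB
  rw [if_neg (by omega)]
  by_cases h2 : PySem.Int.mod m 2 = 0
  · have hdvd : (2:Int) ∣ m := (PySem.Int.mod_eq_zero_iff_dvd m 2).mp h2
    have h4 : 4 ≤ m := by omega
    rw [if_pos (by simp [hdvd])]
    simp only [show (m == 2) = false from by simp; omega, Bool.false_eq_true, false_iff]
    exact fun h => h 2 le_rfl (by omega) hdvd
  · have hodd : ¬ (2:Int) ∣ m := fun hd => h2 ((PySem.Int.mod_eq_zero_iff_dvd m 2).mpr hd)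
    rw [if_neg (by simpa using h2)]
    refine trial_true_iff m hm hodd _ 3 le_rfl (by decide) ?_ rfl
    intro j hj2 hj3 hjm
    have : j = 2 := by omega
    exact hodd (this ▸ hjm)

lemma test_eq (m : Int) (hm : 3 ≤ m) (acc : Bool) :
    pvForJ m (PySem.List.pyRange 2 m 1) acc = pvIsPrimeB m := by
  have h1 : pvForJ m (PySem.List.pyRange 2 m 1) acc = true ↔ pvNoDiv m :=
    forJ_true_iff m (m - 2).toNat 2 le_rfl (by omega) rfl acc
  have h2 := primeB_true_iff m hm
  have h3 := h1.trans h2.symm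
  cases hf : pvForJ m (PySem.List.pyRange 2 m 1) acc <;>
    cases hb : pvIsPrimeB m <;> simp_all

lemma loops_eq : ∀ (f : Nat) (num n : Int) (acc : Bool), num < n + 1 → 3 ≤ n →
    pvLoopA num f n acc = pvLoopB f (n + 1) := by
  intro f
  induction f with
  | zero => intro num n acc _ _; rfl
  | succ f ih =>
    intro num n acc h1 h2
    simp only [pvLoopA, pvLoopB]
    rw [test_eq (n + 1) (by omega) acc]
    rw [show decide (n + 1 > num) = true from by simp; omega, Bool.and_true]
    have hrec := ih num (n + 1) (pvIsPrimeB (n + 1)) (by omega) (by omega)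
    rw [show n + 1 + 1 = n + 2 from by ring] at hrec
    cases hp : pvIsPrimeB (n + 1) <;> cases hl : pvIsPal (n + 1) <;>
      simp_all [show n + 1 + 1 = n + 2 from by ring]

lemma primeB_three : pvIsPrimeB 3 = true := by
  unfold pvIsPrimeB
  rw [if_neg (by decide), if_neg (by decide), pvTrial, dif_neg (by decide)]

lemma loopB_first_hit (f : Nat) (n : Int) (h : (pvIsPal n && pvIsPrimeB n) = true) :
    pvLoopB (f + 1) n = n := by
  simp [pvLoopB, h]

-- ===== VERDICT (by name: the statement is the Claim_ definition above) =====
theorem prime_palindrome_spec : Claim_equal_prime_palindrome := by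
  intro num _
  unfold Spec_prime_palindrome prime_palindrome prime_palindrome_alt
  by_cases h1 : num ≤ 1
  · rw [if_pos h1]
    rw [show max (num + 1) 2 = 2 from max_eq_right (by omega)]
    rw [show ((20000000001 : Int) - 2).toNat = 19999999998 + 1 from by decide]
    rw [loopB_first_hit _ 2 (by decide)]
  · rw [if_neg h1]
    by_cases h2 : num = 2
    · rw [if_pos h2, h2]
      rw [show max ((2:Int) + 1) 2 = 3 from by norm_num]
      rw [show ((20000000001 : Int) - 3).toNat = 19999999997 + 1 from by decide]
      rw [loopB_first_hit _ 3 (by simp [primeB_three, show pvIsPal 3 = true from by decide])]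
    · rw [if_neg h2]
      have h3 : 3 ≤ num := by omega
      rw [show max (num + 1) 2 = num + 1 from max_eq_left (by omega)]
      rw [show ((20000000001 : Int) - (num + 1)).toNat = (20000000000 - num).toNat from by omega]
      exact loops_eq _ num num true (by omega) h3
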